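-- pv_equiv track=rewrite | github.com/kaluginpeter/Algorithms_and_structures_tasks | Python_Solutions/CodeWars/6kyu/Find_Cracker.py | find_hack
-- ===== SOURCE A (Python) =====
-- def find_hack(arr):
--     ht: dict = {'A': 30, 'B': 20, 'C': 10, 'D': 5}
--     hackers: list = []
--     for i in arr:
--         name, points, scores = i
--         top: int = 0
--         flag: bool = True
--         courses: int = 0
--         for j in scores:
--             courses += 1
--             if j in ht:
--                 if j not in {'A', 'B'}:
--                     flag = False
--                 top += ht[j]
--             else:
--                 flag = False
--         if flag and courses > 4:
--             top += 20
--         top = 200 if top >= 200 else top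
--         if top != points:
--             hackers.append(name)
--     return hackers
-- ===== SOURCE B (Python) =====
-- def find_hack(arr):
--     hackers = []
--     for name, points, scores in arr:
--         a = scores.count('A')
--         b = scores.count('B')
--         top = 30 * a + 20 * b + 10 * scores.count('C') + 5 * scores.count('D')
--         courses = len(scores)
--         if a + b == courses and courses > 4:
--             top += 20
--         if min(200, top) != points:
--             hackers.append(name)
--     return hackers
-- ===== Notes on version B (the rewrite author's own statement) =====
-- stated objective: simpler
-- what changed: The per-grade inner loop with its top/flag/courses accumulators is replaced by a closed arithmetic expression over list.count of each grade: top = 30*A+20*B+10*C+5*D, the all-A/B flag becomes count(A)+count(B)==len(scores), and the cap is min(200, top).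
import Mathlib
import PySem

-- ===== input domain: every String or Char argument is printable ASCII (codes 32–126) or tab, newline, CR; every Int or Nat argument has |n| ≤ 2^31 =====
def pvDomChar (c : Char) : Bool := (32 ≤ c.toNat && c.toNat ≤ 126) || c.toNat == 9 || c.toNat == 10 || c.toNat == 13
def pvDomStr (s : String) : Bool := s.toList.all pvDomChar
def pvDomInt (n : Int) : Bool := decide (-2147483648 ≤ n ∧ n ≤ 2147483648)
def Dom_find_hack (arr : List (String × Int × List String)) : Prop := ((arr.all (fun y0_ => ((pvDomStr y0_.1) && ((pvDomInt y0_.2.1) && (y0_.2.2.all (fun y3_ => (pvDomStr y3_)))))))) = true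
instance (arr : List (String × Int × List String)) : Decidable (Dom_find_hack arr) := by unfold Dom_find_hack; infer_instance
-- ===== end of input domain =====

-- B replaces A's per-grade inner loop and accumulators with closed arithmetic over list.count (objective: simpler).

-- ===== PORT A =====
def htA : PySem.Dict String Int := PySem.Dict.ofList [("A", 30), ("B", 20), ("C", 10), ("D", 5)]

-- inner loop of A: state (top, flag, courses)
def stepA (st : Int × Bool × Int) (j : String) : Int × Bool × Int :=
  let courses := st.2.2 + 1
  if (htA.get? j).isSome then
    (st.1 + htA.getD j 0, if j = "A" ∨ j = "B" then st.2.1 else false, courses)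
  else
    (st.1, false, courses)

def find_hack (arr : List (String × Int × List String)) : List String :=
  arr.foldl (fun hackers i =>
    let name := i.1
    let points := i.2.1
    let scores := i.2.2
    let st := scores.foldl stepA ((0 : Int), true, (0 : Int))
    let top := st.1
    let flag := st.2.1
    let courses := st.2.2
    let top := if flag ∧ courses > 4 then top + 20 else top
    let top := if top ≥ 200 then 200 else top
    if top ≠ points then hackers ++ [name] else hackers) []

-- ===== PORT B =====
def find_hack_alt (arr : List (String × Int × List String)) : List String :=
  arr.foldl (fun hackers i =>
    let name := i.1
    let points := i.2.1
    let scores := i.2.2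
    let a : Int := PySem.List.count scores "A"
    let b : Int := PySem.List.count scores "B"
    let top : Int := 30 * a + 20 * b + 10 * (PySem.List.count scores "C" : Int)
                     + 5 * (PySem.List.count scores "D" : Int)
    let courses : Int := scores.length
    let top := if a + b = courses ∧ courses > 4 then top + 20 else top
    if min 200 top ≠ points then hackers ++ [name] else hackers) []

-- ===== PRECONDITION & SPEC =====
def Spec_find_hack (arr : List (String × Int × List String)) (out : List String) : Prop := out = find_hack_alt arr
instance (arr : List (String × Int × List String)) (out : List String) : Decidable (Spec_find_hack arr out) := by unfold Spec_find_hack; infer_instance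

-- ===== CLAIM (what is proved, stated in full; the proofs are below) =====
def Claim_equal_find_hack : Prop := ∀ (arr : List (String × Int × List String)), Dom_find_hack arr → Spec_find_hack arr (find_hack arr)

-- ===== LEMMAS AND PROOFS =====

-- counts of two distinct values are bounded by the length
theorem count_two_le (rest : List String) :
    rest.count "A" + rest.count "B" ≤ rest.length := by
  induction rest with
  | nil => simp
  | cons x t ih =>
    by_cases hx : x = "A"
    · by_cases hy : x = "B"
      · exact absurd (hx ▸ hy) (by decide)
      · simp [hx]; omega
    · by_cases hy : x = "B"
      · simp [hy]; omega
      · simp [hx, hy]; omega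

-- A's inner loop computed in closed form over the grade counts.
theorem foldl_stepA (scores : List String) (top : Int) (flag : Bool) (courses : Int) :
    scores.foldl stepA (top, flag, courses) =
      (top + 30 * (scores.count "A" : Int) + 20 * (scores.count "B" : Int)
         + 10 * (scores.count "C" : Int) + 5 * (scores.count "D" : Int),
       flag && decide ((scores.count "A" : Int) + (scores.count "B" : Int) = scores.length),
       courses + scores.length) := by
  induction scores generalizing top flag courses with
  | nil => simp
  | cons j rest ih =>
    have hle := count_two_le rest
    by_cases hA : j = "A"
    · subst hA
      have hg : (htA.get? "A").isSome = true := by decide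
      have hd : htA.getD "A" 0 = 30 := by decide
      simp only [List.foldl_cons, stepA, hg, hd, if_true, ih,
        List.count_cons, List.length_cons]
      refine Prod.ext ?_ (Prod.ext ?_ ?_)
      · simp; push_cast; ring
      · cases flag <;> simp [decide_eq_decide] <;> push_cast <;> omega
      · simp; push_cast; ring
    · by_cases hB : j = "B"
      · subst hB
        have hg : (htA.get? "B").isSome = true := by decide
        have hd : htA.getD "B" 0 = 20 := by decide
        simp only [List.foldl_cons, stepA, hg, hd, if_true, ih,
          List.count_cons, List.length_cons]
        refine Prod.ext ?_ (Prod.ext ?_ ?_)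
        · simp [hA]; push_cast; ring
        · cases flag <;> simp [hA, decide_eq_decide] <;> push_cast <;> omega
        · simp; push_cast; ring
      · by_cases hC : j = "C"
        · subst hC
          have hg : (htA.get? "C").isSome = true := by decide
          have hd : htA.getD "C" 0 = 10 := by decide
          have hor : ¬(("C" : String) = "A" ∨ ("C" : String) = "B") := by decide
          simp only [List.foldl_cons, stepA, hg, hd, if_neg hor, if_true, ih,
            List.count_cons, List.length_cons]
          refine Prod.ext ?_ (Prod.ext ?_ ?_)
          · simp [hA, hB]; push_cast; ring
          · simp [hA, hB]; push_cast; omega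
          · simp; push_cast; ring
        · by_cases hD : j = "D"
          · subst hD
            have hg : (htA.get? "D").isSome = true := by decide
            have hd : htA.getD "D" 0 = 5 := by decide
            have hor : ¬(("D" : String) = "A" ∨ ("D" : String) = "B") := by decide
            simp only [List.foldl_cons, stepA, hg, hd, if_neg hor, if_true, ih,
              List.count_cons, List.length_cons]
            refine Prod.ext ?_ (Prod.ext ?_ ?_)
            · simp [hA, hB, hC]; push_cast; ring
            · simp [hA, hB]; push_cast; omega
            · simp; push_cast; ring
          · have hmk : htA = PySem.Dict.mk [("A", 30), ("B", 20), ("C", 10), ("D", 5)] := by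
              decide
            have hg : (htA.get? j).isSome = false := by
              simp [hmk, PySem.Dict.get?_mk_cons, beq_iff_eq, Ne.symm hA, Ne.symm hB,
                Ne.symm hC, Ne.symm hD, PySem.Dict.get?]
            simp only [List.foldl_cons, stepA, hg, Bool.false_eq_true, if_false, ih,
              List.count_cons, List.length_cons]
            refine Prod.ext ?_ (Prod.ext ?_ ?_)
            · simp [hA, hB, hC, hD] <;> push_cast <;> ring
            · simp [hA, hB] <;> push_cast <;> omega
            · simp; push_cast; ring

-- ===== VERDICT (by name: the statement is the Claim_ definition above) =====
theorem find_hack_spec : Claim_equal_find_hack := by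
  intro arr _
  show find_hack arr = find_hack_alt arr
  unfold find_hack find_hack_alt
  congr 1
  funext hackers i
  obtain ⟨name, points, scores⟩ := i
  simp only [foldl_stepA, PySem.List.count_eq, Int.min_def, Bool.true_and,
    decide_eq_true_eq, zero_add]
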